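-- pv_equiv track=rewrite | github.com/VladislavBulanov/Python_Basic_2 | Module19/10_palindrome_again/main.py | can_become_palindrome
-- ===== SOURCE A (Python) =====
-- def can_become_palindrome(source_string):
--     symbols_frequency = dict()
--     for symbol in source_string:
--         symbols_frequency[symbol] = symbols_frequency.get(symbol, 0) + 1
--
--     odds_quantity = 0
--     for value in symbols_frequency.values():
--         if value % 2 == 1:
--             odds_quantity += 1
--
--     if odds_quantity <= 1:
--         return True
--     else:
--         return False
-- ===== SOURCE B (Python) =====
-- def can_become_palindrome(source_string):
--     odds = set()
--     for symbol in source_string: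
--         if symbol in odds:
--             odds.remove(symbol)
--         else:
--             odds.add(symbol)
--     return len(odds) <= 1
-- ===== Notes on version B (the rewrite author's own statement) =====
-- stated objective: simpler
-- what changed: Replaces the frequency dictionary plus a second pass over its values with a single pass maintaining a set of characters seen an odd number of times (parity toggle), returning len(odds) <= 1.
import Mathlib
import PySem

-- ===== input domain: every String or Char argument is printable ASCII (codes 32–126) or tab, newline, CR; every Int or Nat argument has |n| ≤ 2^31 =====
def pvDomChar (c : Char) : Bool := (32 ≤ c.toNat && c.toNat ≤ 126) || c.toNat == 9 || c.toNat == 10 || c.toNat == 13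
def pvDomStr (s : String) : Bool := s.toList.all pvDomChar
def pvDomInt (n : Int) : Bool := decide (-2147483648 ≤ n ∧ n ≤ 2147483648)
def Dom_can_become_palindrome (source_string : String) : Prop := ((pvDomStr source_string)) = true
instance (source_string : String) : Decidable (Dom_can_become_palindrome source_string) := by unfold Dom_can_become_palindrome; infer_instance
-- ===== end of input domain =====

-- B replaces A's frequency dict + second pass over its values by a single-pass
-- parity-toggle set of characters seen an odd number of times (simpler, same cost).


-- ===== PORT A =====
def can_become_palindrome (source_string : String) : Bool :=
  let symbols_frequency : PySem.Dict Char Int :=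
    source_string.toList.foldl
      (fun d symbol => d.insert symbol (d.getD symbol 0 + 1)) PySem.Dict.empty
  let odds_quantity : Int :=
    symbols_frequency.values.foldl
      (fun n v => if PySem.Int.mod v 2 == 1 then n + 1 else n) 0
  if odds_quantity ≤ 1 then true else false

-- ===== PORT B =====
def can_become_palindrome_alt (source_string : String) : Bool :=
  let odds : PySem.Set Char :=
    source_string.toList.foldl
      (fun odds symbol =>
        if PySem.Set.contains odds symbol then (PySem.Set.remove? odds symbol).getD odds
        else PySem.Set.add odds symbol)
      PySem.Set.empty
  decide (PySem.Set.len odds ≤ 1)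

-- ===== PRECONDITION & SPEC =====
def Spec_can_become_palindrome (source_string : String) (out : Bool) : Prop := out = can_become_palindrome_alt source_string
instance (source_string : String) (out : Bool) : Decidable (Spec_can_become_palindrome source_string out) := by unfold Spec_can_become_palindrome; infer_instance

-- ===== CLAIM (what is proved, stated in full; the proofs are below) =====
def Claim_equal_can_become_palindrome : Prop := ∀ (source_string : String), Dom_can_become_palindrome source_string → Spec_can_become_palindrome source_string (can_become_palindrome source_string)

-- ===== LEMMAS AND PROOFS =====

-- A's frequency loop is exactly Counter: insert symbol (getD symbol 0 + 1) IS Dict.modify symbol 0 (·+1).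
theorem pvA_dict_eq_counter (l : List Char) :
    l.foldl (fun d symbol => d.insert symbol (d.getD symbol 0 + 1)) PySem.Dict.empty
      = PySem.Dict.counter l := by
  rw [PySem.Dict.counter_eq_foldl]; rfl

-- A's counting loop is countP.
theorem pvFoldl_count_if {α : Type} (p : α → Bool) (l : List α) (n : Int) :
    l.foldl (fun n v => if p v then n + 1 else n) n = n + (l.countP p : Int) := by
  induction l generalizing n with
  | nil => simp
  | cons x xs ih =>
      by_cases h : p x = true
      · simp [List.foldl_cons, h, ih]; ring
      · simp [List.foldl_cons, h, ih]

-- B's loop invariant: the set stays nodup and holds exactly the chars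
-- whose membership-in-start XOR odd-count-in-rest is true.
theorem pvAlt_fold_inv (l : List Char) : ∀ (s : PySem.Set Char), List.Nodup s →
    List.Nodup
      (l.foldl (fun odds symbol =>
        if PySem.Set.contains odds symbol then (PySem.Set.remove? odds symbol).getD odds
        else PySem.Set.add odds symbol) s)
    ∧ ∀ c : Char,
        c ∈ (l.foldl (fun odds symbol =>
          if PySem.Set.contains odds symbol then (PySem.Set.remove? odds symbol).getD odds
          else PySem.Set.add odds symbol) s)
        ↔ Xor' (c ∈ s) (l.count c % 2 = 1) := by
  induction l with
  | nil => intro s hs; refine ⟨hs, fun c => ?_⟩; simp [Xor']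
  | cons x xs ih =>
      intro s hs
      by_cases hx : x ∈ s
      · have hstep : (if PySem.Set.contains s x then (PySem.Set.remove? s x).getD s
            else PySem.Set.add s x) = PySem.Set.discard s x := by
          rw [if_pos ((PySem.Set.contains_iff s x).2 hx), PySem.Set.remove?_of_mem hx]; rfl
        have hnd : List.Nodup (PySem.Set.discard s x) := List.Nodup.filter _ hs
        obtain ⟨h1, h2⟩ := ih (PySem.Set.discard s x) hnd
        rw [List.foldl_cons, hstep]
        refine ⟨h1, fun c => ?_⟩
        rw [h2 c, PySem.Set.mem_discard]
        rcases eq_or_ne c x with rfl | hcx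
        · rw [List.count_cons_self]
          simp [Xor', hx]
          omega
        · have hcnt : List.count c (x :: xs) = List.count c xs := by
            simp [Ne.symm hcx]
          rw [hcnt]
          by_cases hcs : c ∈ s <;> simp [Xor', hcs, hcx]
      · have hstep : (if PySem.Set.contains s x then (PySem.Set.remove? s x).getD s
            else PySem.Set.add s x) = PySem.Set.add s x := by
          rw [if_neg]; simp [hx]
        have hnd : List.Nodup (PySem.Set.add s x) := PySem.Set.nodup_add s x hs
        obtain ⟨h1, h2⟩ := ih (PySem.Set.add s x) hnd
        rw [List.foldl_cons, hstep]
        refine ⟨h1, fun c => ?_⟩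
        rw [h2 c, PySem.Set.mem_add]
        rcases eq_or_ne c x with rfl | hcx
        · rw [List.count_cons_self]
          simp [Xor', hx]
          omega
        · have hcnt : List.count c (x :: xs) = List.count c xs := by
            simp [Ne.symm hcx]
          rw [hcnt]
          by_cases hcs : c ∈ s <;> simp [Xor', hcs, hcx]

-- the predicate A tests on each stored count, on a natural count
theorem pvOddPred (n : Nat) :
    (PySem.Int.mod (n : Int) 2 == 1) = decide (n % 2 = 1) := by
  have h : PySem.Int.mod (n : Int) 2 = (n : Int) % 2 := by
    unfold PySem.Int.mod
    rw [Int.fmod_eq_emod]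
    simp
  rw [h]
  by_cases hn : n % 2 = 1 <;> simp [hn] <;> omega

theorem can_become_palindrome_eq (l : List Char) :
    (if (l.foldl (fun d symbol => d.insert symbol (d.getD symbol 0 + 1))
          PySem.Dict.empty).values.foldl
          (fun n v => if PySem.Int.mod v 2 == 1 then n + 1 else n) (0 : Int) ≤ 1
      then true else false)
    = decide (PySem.Set.len
        (l.foldl (fun odds symbol =>
          if PySem.Set.contains odds symbol then (PySem.Set.remove? odds symbol).getD odds
          else PySem.Set.add odds symbol) PySem.Set.empty) ≤ 1) := by
  -- A side: odds_quantity = number of chars of Set.ofList l with odd count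
  have hvals : (l.foldl (fun d symbol => d.insert symbol (d.getD symbol 0 + 1))
        PySem.Dict.empty).values
      = (PySem.Set.ofList l).map (fun k => ((l.count k : Nat) : Int)) := by
    rw [pvA_dict_eq_counter]
    unfold PySem.Dict.values
    rw [PySem.Dict.items_counter, List.map_map]; rfl
  have hA : (l.foldl (fun d symbol => d.insert symbol (d.getD symbol 0 + 1))
        PySem.Dict.empty).values.foldl
        (fun n v => if PySem.Int.mod v 2 == 1 then n + 1 else n) (0 : Int)
      = (((PySem.Set.ofList l).filter (fun k => decide (l.count k % 2 = 1))).length : Int) := by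
    rw [hvals, pvFoldl_count_if, List.countP_map, zero_add]
    congr 1
    rw [← List.countP_eq_length_filter]
    congr 1
    funext k
    exact pvOddPred (l.count k)
  -- B side
  obtain ⟨hnd, hmem⟩ := pvAlt_fold_inv l PySem.Set.empty List.nodup_nil
  -- the two lists are permutations of one another
  have hperm : (l.foldl (fun odds symbol =>
        if PySem.Set.contains odds symbol then (PySem.Set.remove? odds symbol).getD odds
        else PySem.Set.add odds symbol) PySem.Set.empty).Perm
      ((PySem.Set.ofList l).filter (fun k => decide (l.count k % 2 = 1))) := by
    rw [List.perm_ext_iff_of_nodup hnd (List.Nodup.filter _ (PySem.Set.nodup_ofList l))]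
    intro c
    rw [hmem c, List.mem_filter, PySem.Set.mem_ofList]
    constructor
    · intro h
      have hodd : l.count c % 2 = 1 := by
        rcases h with ⟨h, _⟩ | ⟨h, hn⟩
        · exact absurd h (List.not_mem_nil)
        · exact h
      exact ⟨List.count_pos_iff.mp (by omega), by simpa using hodd⟩
    · rintro ⟨_, h⟩
      exact Or.inr ⟨by simpa using h, List.not_mem_nil⟩
  have hlen := hperm.length_eq
  unfold PySem.Set.len
  rw [hA, hlen]
  by_cases h : (((PySem.Set.ofList l).filter (fun k => decide (l.count k % 2 = 1))).length : Int) ≤ 1 <;>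
    simp [h]

-- ===== VERDICT (by name: the statement is the Claim_ definition above) =====
theorem can_become_palindrome_spec : Claim_equal_can_become_palindrome := by
  intro s _
  unfold Spec_can_become_palindrome can_become_palindrome can_become_palindrome_alt
  exact can_become_palindrome_eq s.toList
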